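-- pv_equiv track=rewrite | github.com/ShayMorad/Intro-to-CS | Exercise 03/ex3.py | convolve
-- ===== SOURCE A (Python) =====
-- def convolve(mat):
--     """This function receives a matrix.
--     It then returns a matrix where each value starting from the top left (0, 0).
--     Each value in it is calculated by summarizing up all numbers in a 3x3 square from the original input matrix,
--     then going right within the columns of the original matrix to calculate the second value for the returned matrix,
--     and so on.
--     After the square right edge reaches the right-most column of the original matrix, it goes back to the starting point
--     but lowers 1 row, downwards.
--     This goes on until the function calculates the whole returned matrix and returns it.
--     """
--
--     # Check for error in input matrix. If error return None.
--     if len(mat) == 0 or mat == []: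
--         return None
--
--     rows = len(mat) - 2
--     columns = len(mat[0]) - 2
--     list_of_lists = []
--
--     # Create an empty list in the required size as the returned matrix
--     for i in range(rows):
--         list_of_lists.append([])
--
--     # Calculate the values for each number and append it to the returned matrix
--     for x in range(rows):
--         for y in range(columns):
--             curr_sum = mat[x][y] + mat[x][y + 1] + mat[x][y + 2] + \
--                        mat[x + 1][y] + mat[x + 1][y + 1] + mat[x + 1][y + 2] + \
--                        mat[x + 2][y] + mat[x + 2][y + 1] + mat[x + 2][y + 2]
--             list_of_lists[x].append(curr_sum)
--     return list_of_lists
-- ===== SOURCE B (Python) =====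
-- def convolve(mat):
--     if len(mat) == 0:
--         return None
--     columns = len(mat[0]) - 2
--     # table of horizontal triple-sums: one pass over rows
--     h = [[row[y] + row[y + 1] + row[y + 2] for y in range(columns)] for row in mat]
--     # each output cell sums three vertically adjacent table entries
--     return [[h[x][y] + h[x + 1][y] + h[x + 2][y] for y in range(columns)]
--             for x in range(len(mat) - 2)]
-- ===== Notes on version B (the rewrite author's own statement) =====
-- stated objective: alternative
-- what changed: B replaces A's per-cell re-summing of 3x3 windows by a separable two-pass scheme: a table of horizontal triple-sums per row, then each output cell as the sum of three table entries.
-- outside the precondition, e.g. on convolve([[1, 2, 3], [1]]): A returns [], B raises IndexError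
import Mathlib
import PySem

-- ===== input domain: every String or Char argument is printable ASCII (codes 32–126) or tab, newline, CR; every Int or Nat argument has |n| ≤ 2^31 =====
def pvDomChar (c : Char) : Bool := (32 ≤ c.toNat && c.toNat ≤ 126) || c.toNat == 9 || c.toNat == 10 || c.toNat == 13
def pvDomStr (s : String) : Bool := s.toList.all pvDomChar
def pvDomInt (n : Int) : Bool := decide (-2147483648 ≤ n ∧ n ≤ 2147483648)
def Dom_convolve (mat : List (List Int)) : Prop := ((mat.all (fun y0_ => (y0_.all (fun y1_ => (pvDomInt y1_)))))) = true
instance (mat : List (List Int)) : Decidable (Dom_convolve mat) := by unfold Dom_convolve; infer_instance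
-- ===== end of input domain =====

-- B replaces A's per-cell 3x3 re-summing by a separable scheme (a table of horizontal
-- triple-sums per row, then each cell as a sum of three table entries); same exact values.

-- ===== PORT A =====
-- A's 9-term window sum, in A's textual order; mat[x][y] is pyGetD (in range on Pre_ inputs)
def pvSum9 (mat : List (List Int)) (x y : Int) : Int :=
  (PySem.List.pyGetD (PySem.List.pyGetD mat x []) y 0) + (PySem.List.pyGetD (PySem.List.pyGetD mat x []) (y+1) 0) + (PySem.List.pyGetD (PySem.List.pyGetD mat x []) (y+2) 0) +
  (PySem.List.pyGetD (PySem.List.pyGetD mat (x+1) []) y 0) + (PySem.List.pyGetD (PySem.List.pyGetD mat (x+1) []) (y+1) 0) + (PySem.List.pyGetD (PySem.List.pyGetD mat (x+1) []) (y+2) 0) +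
  (PySem.List.pyGetD (PySem.List.pyGetD mat (x+2) []) y 0) + (PySem.List.pyGetD (PySem.List.pyGetD mat (x+2) []) (y+1) 0) + (PySem.List.pyGetD (PySem.List.pyGetD mat (x+2) []) (y+2) 0)

-- literal port of A: build `rows` empty lists, then the double loop appends into list_of_lists[x]
-- (x comes from range(rows), so 0 ≤ x and x.toNat is Python's nonnegative list index, exact here)
def convolve (mat : List (List Int)) : Option (List (List Int)) :=
  if mat.length = 0 ∨ mat = [] then none
  else
    let rows : Int := (mat.length : Int) - 2
    let columns : Int := ((PySem.List.pyGetD mat 0 []).length : Int) - 2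
    let init : List (List Int) := (PySem.List.pyRange 0 rows 1).foldl (fun acc _ => acc ++ [([] : List Int)]) []
    some ((PySem.List.pyRange 0 rows 1).foldl (fun acc x =>
      (PySem.List.pyRange 0 columns 1).foldl (fun acc2 y =>
        acc2.modify x.toNat (fun r => r ++ [pvSum9 mat x y])) acc) init)

-- ===== PORT B =====
-- horizontal triple-sum table row: h-row[y] = row[y] + row[y+1] + row[y+2] for y in range(columns)
def pvHRow (columns : Int) (row : List Int) : List Int :=
  (PySem.List.pyRange 0 columns 1).map (fun y =>
    PySem.List.pyGetD row y 0 + PySem.List.pyGetD row (y+1) 0 + PySem.List.pyGetD row (y+2) 0)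

def convolve_alt (mat : List (List Int)) : Option (List (List Int)) :=
  if mat.length = 0 then none
  else
    let columns : Int := ((PySem.List.pyGetD mat 0 []).length : Int) - 2
    let h : List (List Int) := mat.map (pvHRow columns)
    some ((PySem.List.pyRange 0 ((mat.length : Int) - 2) 1).map (fun x =>
      (PySem.List.pyRange 0 columns 1).map (fun y =>
        PySem.List.pyGetD (PySem.List.pyGetD h x []) y 0 +
        PySem.List.pyGetD (PySem.List.pyGetD h (x+1) []) y 0 +
        PySem.List.pyGetD (PySem.List.pyGetD h (x+2) []) y 0)))

-- ===== PRECONDITION & SPEC =====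
-- Pre_ excludes ragged matrices with a row shorter than a first row of length ≥ 3: there
-- Python A raises IndexError, except when the matrix has ≤ 2 rows, where A accidentally
-- returns a degenerate value while B (which always builds its table) raises.
def Pre_convolve (mat : List (List Int)) : Prop :=
  (mat.headD []).length ≤ 2 ∨ ∀ row ∈ mat, (mat.headD []).length ≤ row.length
instance (mat : List (List Int)) : Decidable (Pre_convolve mat) := by unfold Pre_convolve; infer_instance

def pvWitness_convolve : List (List Int) := [[1,2,3],[4,5,6],[7,8,9]]

def Spec_convolve (mat : List (List Int)) (out : Option (List (List Int))) : Prop := out = convolve_alt mat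
instance (mat : List (List Int)) (out : Option (List (List Int))) : Decidable (Spec_convolve mat out) := by unfold Spec_convolve; infer_instance

-- ===== CLAIM (what is proved, stated in full; the proofs are below) =====
def Claim_equal_convolve : Prop := ∀ (mat : List (List Int)), Dom_convolve mat → Pre_convolve mat → Spec_convolve mat (convolve mat)

-- ===== LEMMAS AND PROOFS =====

-- modify at the length of the left part acts on the head of the right part
theorem pvModApp {α : Type} (l₂ : List α) (f : α → α) :
    ∀ (l₁ : List α), (l₁ ++ l₂).modify l₁.length f = l₁ ++ l₂.modify 0 f
  | [] => rfl
  | a :: t => by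
    have := pvModApp l₂ f t
    simpa [List.modify] using this

theorem pvModifyId {α : Type} (acc : List α) (k : Nat) : acc.modify k (fun r => r) = acc := by
  rw [List.modify_eq_set_getElem?]
  cases h : acc[k]? with
  | none => simp
  | some v =>
    obtain ⟨hk, hv⟩ := List.getElem?_eq_some_iff.mp h
    simp [← hv]

-- inner loop of A: repeatedly appending single cells into slot k = one append of the mapped list
theorem pvInner (k : Nat) (f : Int → Int) :
    ∀ (L : List Int) (acc : List (List Int)),
      L.foldl (fun a y => a.modify k (fun r => r ++ [f y])) acc
        = acc.modify k (fun r => r ++ L.map f)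
  | [], acc => by simpa using (pvModifyId acc k).symm
  | y :: L, acc => by
    rw [List.foldl_cons, pvInner k f L, List.modify_modify_eq]
    congr 1
    funext r
    simp [Function.comp]

-- outer loop of A: filling slots done.length, done.length+1, … of done ++ replicate m []
theorem pvOuter (g : Int → List Int) :
    ∀ (m : Nat) (done : List (List Int)),
      (PySem.List.pyRange (done.length : Int) ((done.length : Int) + m) 1).foldl
          (fun acc x => acc.modify x.toNat (fun r => r ++ g x))
          (done ++ List.replicate m ([] : List Int))
        = done ++ (PySem.List.pyRange (done.length : Int) ((done.length : Int) + m) 1).map g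
  | 0, done => by simp [PySem.List.pyRange_one_eq_nil]
  | m + 1, done => by
    have hlt : (done.length : Int) < (done.length : Int) + (m + 1 : Nat) := by push_cast; omega
    rw [PySem.List.pyRange_one_cons hlt]
    have hrep : List.replicate (m + 1) ([] : List Int) = [] :: List.replicate m [] := rfl
    rw [hrep, List.foldl_cons, List.map_cons]
    have hstep : ((done ++ [] :: List.replicate m ([] : List Int)).modify
          ((done.length : Int)).toNat (fun r => r ++ g (done.length : Int)))
        = (done ++ [g (done.length : Int)]) ++ List.replicate m ([] : List Int) := by
      rw [Int.toNat_natCast, pvModApp]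
      simp [List.modify]
    rw [hstep]
    have hlen : ((done ++ [g (done.length : Int)]).length : Int) = (done.length : Int) + 1 := by
      simp
    have := pvOuter g m (done ++ [g (done.length : Int)])
    rw [hlen] at this
    have hend : (done.length : Int) + 1 + (m : Int) = (done.length : Int) + ((m + 1 : Nat) : Int) := by
      push_cast; omega
    rw [hend] at this
    rw [this, List.append_assoc, List.singleton_append]

-- a pyGetD at an in-range nonnegative index does not depend on the default
theorem pvGetD_irrel {α : Type} (l : List α) (t : Int) (d d' : α)
    (h0 : 0 ≤ t) (h1 : t < l.length) : PySem.List.pyGetD l t d = PySem.List.pyGetD l t d' := by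
  have ht : t = ((t.toNat : Nat) : Int) := (Int.toNat_of_nonneg h0).symm
  rw [ht, PySem.List.pyGetD_natCast, PySem.List.pyGetD_natCast]
  have hn : t.toNat < l.length := by omega
  rw [List.getD_eq_getElem l d hn, List.getD_eq_getElem l d' hn]

-- pyGetD through a map, at an in-range nonnegative index
theorem pvGetD_map (f : List Int → List Int) (l : List (List Int)) (t : Int)
    (h0 : 0 ≤ t) (h1 : t < l.length) :
    PySem.List.pyGetD (l.map f) t [] = f (PySem.List.pyGetD l t []) := by
  have h1' : t < ((l.map f).length : Int) := by simp; omega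
  rw [pvGetD_irrel (l.map f) t [] (f []) h0 h1', PySem.List.pyGetD_map]

-- reading B's table row at y ∈ [0, columns)
theorem pvHRow_get (columns : Int) (row : List Int) (y : Int) (h0 : 0 ≤ y) (h1 : y < columns) :
    PySem.List.pyGetD (pvHRow columns row) y 0
      = PySem.List.pyGetD row y 0 + PySem.List.pyGetD row (y+1) 0 + PySem.List.pyGetD row (y+2) 0 := by
  have ht : y = ((y.toNat : Nat) : Int) := (Int.toNat_of_nonneg h0).symm
  have hlen : y.toNat < (PySem.List.pyRange 0 columns 1).length := by
    rw [PySem.List.length_pyRange_one]; omega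
  rw [pvHRow, ht, PySem.List.pyGetD_natCast]
  rw [List.getD_eq_getElem _ _ (by simpa using hlen)]
  rw [List.getElem_map, PySem.List.getElem_pyRange_one]
  simp [← ht]

-- the common closed form both ports compute (for a nonempty matrix)
theorem pvA_eq (mat : List (List Int)) (h : mat ≠ []) :
    convolve mat = some ((PySem.List.pyRange 0 ((mat.length : Int) - 2) 1).map (fun x =>
      (PySem.List.pyRange 0 (((PySem.List.pyGetD mat 0 []).length : Int) - 2) 1).map
        (fun y => pvSum9 mat x y))) := by
  have hne : ¬ (mat.length = 0 ∨ mat = []) := by simp [h]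
  rw [convolve, if_neg hne]
  dsimp only
  set rows : Int := (mat.length : Int) - 2 with hrows
  set columns : Int := ((PySem.List.pyGetD mat 0 []).length : Int) - 2 with hcols
  congr 1
  have hfun : (fun (acc : List (List Int)) (x : Int) =>
        (PySem.List.pyRange 0 columns 1).foldl (fun acc2 y =>
          acc2.modify x.toNat (fun r => r ++ [pvSum9 mat x y])) acc)
      = fun acc x => acc.modify x.toNat (fun r => r ++ (PySem.List.pyRange 0 columns 1).map (pvSum9 mat x)) := by
    funext acc x
    exact pvInner x.toNat (pvSum9 mat x) _ acc
  have hinit : (PySem.List.pyRange 0 rows 1).foldl (fun acc _ => acc ++ [([] : List Int)]) []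
      = List.replicate rows.toNat ([] : List Int) := by
    rw [PySem.List.foldl_append_singleton_eq_map]
    simp [List.map_const', PySem.List.length_pyRange_one]
  rw [hfun, hinit]
  rcases lt_or_ge 0 rows with hr | hr
  · have hr' : rows = (([] : List (List Int)).length : Int) + (rows.toNat : Int) := by
      simp [Int.toNat_of_nonneg hr.le]
    have := pvOuter (fun x => (PySem.List.pyRange 0 columns 1).map (pvSum9 mat x)) rows.toNat []
    simpa [← hr', Int.toNat_of_nonneg hr.le] using this
  · rw [PySem.List.pyRange_one_eq_nil hr]
    simp [Int.toNat_of_nonpos hr]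

theorem pvB_eq (mat : List (List Int)) (h : mat ≠ []) :
    convolve_alt mat = some ((PySem.List.pyRange 0 ((mat.length : Int) - 2) 1).map (fun x =>
      (PySem.List.pyRange 0 (((PySem.List.pyGetD mat 0 []).length : Int) - 2) 1).map
        (fun y => pvSum9 mat x y))) := by
  have hne : ¬ (mat.length = 0) := by simp [h]
  rw [convolve_alt, if_neg hne]
  dsimp only
  set columns : Int := ((PySem.List.pyGetD mat 0 []).length : Int) - 2 with hcols
  congr 1
  apply List.map_congr_left
  intro x hx
  rw [PySem.List.mem_pyRange_one] at hx
  apply List.map_congr_left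
  intro y hy
  rw [PySem.List.mem_pyRange_one] at hy
  have hget : ∀ t : Int, 0 ≤ t → t < (mat.length : Int) →
      PySem.List.pyGetD (mat.map (pvHRow columns)) t [] = pvHRow columns (PySem.List.pyGetD mat t []) := by
    intro t h0 h1
    exact pvGetD_map (pvHRow columns) mat t h0 h1
  rw [hget x (by omega) (by omega), hget (x+1) (by omega) (by omega), hget (x+2) (by omega) (by omega)]
  rw [pvHRow_get columns _ y hy.1 hy.2, pvHRow_get columns _ y hy.1 hy.2, pvHRow_get columns _ y hy.1 hy.2]
  rw [pvSum9]
  ring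

-- ===== VERDICT (by name: the statement is the Claim_ definition above) =====
theorem convolve_spec : Claim_equal_convolve := by
  intro mat _ _
  unfold Spec_convolve
  rcases eq_or_ne mat [] with rfl | h
  · rfl
  · rw [pvA_eq mat h, pvB_eq mat h]
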